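-- pv_equiv track=rewrite | github.com/SHAN-ZHE-YOU/EGT-Hierarchy | hierarchy_package.py | L_distribution
-- ===== SOURCE A (Python) =====
-- def L_distribution(L_i: list, S_i: list, n: int) -> list:
--     """
--     Calculates the distribution of individuals across hierarchy levels.
--
--     Returns:
--         A list of lists in the format: [[level, total_count, C_count, D_count], ...]
--         Sorted from the lowest level to the highest level.
--     """
--     distribution_map = {}
--
--     # Group individuals by their current level
--     for level, state in zip(L_i, S_i):
--         if level not in distribution_map:
--             distribution_map[level] = {'total': 0, 'C': 0, 'D': 0}
--
--         distribution_map[level]['total'] += 1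
--
--         if state in ['C', 'D']:
--             distribution_map[level][state] += 1
--         else:
--             raise ValueError('State must be strictly "C" or "D"')
--
--     # Format into the required list of lists, sorted by level
--     level_distribution = []
--     for level in sorted(distribution_map.keys()):
--         counts = distribution_map[level]
--         level_distribution.append([level, counts['total'], counts['C'], counts['D']])
--
--     return level_distribution
-- ===== SOURCE B (Python) =====
-- def L_distribution(L_i: list, S_i: list, n: int) -> list:
--     """Sort-and-scan re-implementation: validate states, sort (level, state)
--     pairs by level, then emit one [level, total, C, D] row per run of equal
--     levels in a single pass."""
--     pairs = list(zip(L_i, S_i))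
--     for _, state in pairs:
--         if state != 'C' and state != 'D':
--             raise ValueError('State must be strictly "C" or "D"')
--     pairs.sort(key=lambda p: p[0])
--     if not pairs:
--         return []
--     lvl, s0 = pairs[0]
--     t, c, d = 1, (1 if s0 == 'C' else 0), (1 if s0 == 'D' else 0)
--     out = []
--     for level, state in pairs[1:]:
--         if level == lvl:
--             t += 1
--             c += 1 if state == 'C' else 0
--             d += 1 if state == 'D' else 0
--         else:
--             out.append([lvl, t, c, d])
--             lvl, t, c, d = level, 1, (1 if state == 'C' else 0), (1 if state == 'D' else 0)
--     out.append([lvl, t, c, d])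
--     return out
-- ===== Notes on version B (the rewrite author's own statement) =====
-- stated objective: alternative
-- what changed: Replaces A's dict-of-dicts grouping followed by a sort of the keys with a validate pass, a sort of the (level,state) pairs by level, and a single linear scan that emits one [level,total,C,D] row per run of equal levels.
import Mathlib
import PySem

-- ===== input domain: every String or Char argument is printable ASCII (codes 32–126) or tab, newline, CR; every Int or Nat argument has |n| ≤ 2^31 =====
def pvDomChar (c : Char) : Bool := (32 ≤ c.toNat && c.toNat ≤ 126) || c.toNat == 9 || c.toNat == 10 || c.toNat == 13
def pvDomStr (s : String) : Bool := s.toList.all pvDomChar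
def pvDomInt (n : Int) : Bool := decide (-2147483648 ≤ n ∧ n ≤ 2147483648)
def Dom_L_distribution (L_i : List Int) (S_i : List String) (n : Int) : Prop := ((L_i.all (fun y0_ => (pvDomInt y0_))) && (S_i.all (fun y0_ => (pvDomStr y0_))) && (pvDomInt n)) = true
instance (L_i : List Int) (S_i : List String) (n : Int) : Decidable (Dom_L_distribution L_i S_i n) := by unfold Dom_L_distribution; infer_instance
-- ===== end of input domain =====

-- B replaces A's dict-of-dicts grouping + key sort by validate, sort the pairs by level, and one
-- grouping scan over the sorted pairs (alternative decomposition, same asymptotic cost).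

-- ===== PORT A =====
-- one iteration of A's grouping loop (the 'else: raise ValueError' arm returns the dict
-- unchanged; those inputs are excluded by Pre_)
def aStep (d : PySem.Dict Int (Int × Int × Int)) (p : Int × String) : PySem.Dict Int (Int × Int × Int) :=
  let d1 := if d.contains p.1 then d else d.insert p.1 (0, 0, 0)
  let d2 := d1.modify p.1 (0, 0, 0) (fun v => (v.1 + 1, v.2))
  if p.2 == "C" || p.2 == "D" then
    (if p.2 == "C" then d2.modify p.1 (0, 0, 0) (fun v => (v.1, v.2.1 + 1, v.2.2))
     else d2.modify p.1 (0, 0, 0) (fun v => (v.1, v.2.1, v.2.2 + 1)))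
  else d2

def L_distribution (L_i : List Int) (S_i : List String) (n : Int) : List (List Int) :=
  let d := (L_i.zip S_i).foldl aStep PySem.Dict.empty
  (PySem.List.sorted d.keys (fun x => x) false).map
    (fun level => let counts := d.getD level (0, 0, 0); [level, counts.1, counts.2.1, counts.2.2])

-- ===== PORT B =====
-- B's scan loop over the sorted pairs: out = rows emitted so far, (lvl, t, c, d) = running group
def bLoop : List (Int × String) → List (List Int) → Int → Int → Int → Int → List (List Int)
  | [], out, lvl, t, c, d => out ++ [[lvl, t, c, d]]
  | (level, state) :: rest, out, lvl, t, c, d =>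
    if level = lvl then
      bLoop rest out lvl (t + 1) (c + (if state == "C" then 1 else 0)) (d + (if state == "D" then 1 else 0))
    else
      bLoop rest (out ++ [[lvl, t, c, d]]) level 1 (if state == "C" then 1 else 0) (if state == "D" then 1 else 0)

def L_distribution_alt (L_i : List Int) (S_i : List String) (n : Int) : List (List Int) :=
  let pairs := L_i.zip S_i
  if pairs.all (fun p => p.2 == "C" || p.2 == "D") then
    match PySem.List.sorted pairs (fun p => p.1) false with
    | [] => []
    | (lvl, s0) :: rest =>
      bLoop rest [] lvl 1 (if s0 == "C" then 1 else 0) (if s0 == "D" then 1 else 0)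
  else []

-- ===== PRECONDITION & SPEC =====
-- Pre_ excludes exactly the inputs on which A raises ValueError: some zipped state is neither "C" nor "D".
def Pre_L_distribution (L_i : List Int) (S_i : List String) (n : Int) : Prop :=
  ∀ p ∈ L_i.zip S_i, p.2 = "C" ∨ p.2 = "D"
instance (L_i : List Int) (S_i : List String) (n : Int) : Decidable (Pre_L_distribution L_i S_i n) := by
  unfold Pre_L_distribution; infer_instance
def pvWitness_L_distribution : List Int × List String × Int := ([2, 0, 2, -1], ["C", "D", "D", "C"], 4)

def Spec_L_distribution (L_i : List Int) (S_i : List String) (n : Int) (out : List (List Int)) : Prop := out = L_distribution_alt L_i S_i n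
instance (L_i : List Int) (S_i : List String) (n : Int) (out : List (List Int)) : Decidable (Spec_L_distribution L_i S_i n out) := by unfold Spec_L_distribution; infer_instance

-- ===== CLAIM (what is proved, stated in full; the proofs are below) =====
def Claim_equal_L_distribution : Prop := ∀ (L_i : List Int) (S_i : List String) (n : Int), Dom_L_distribution L_i S_i n → Pre_L_distribution L_i S_i n → Spec_L_distribution L_i S_i n (L_distribution L_i S_i n)

-- ===== LEMMAS AND PROOFS =====

-- Int-valued counts of a level / a (level, state) combination in a pair list
def cntI (qs : List (Int × String)) (ℓ : Int) : Int := (qs.countP (fun q => decide (q.1 = ℓ)) : Int)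
def cCI (qs : List (Int × String)) (ℓ : Int) : Int := (qs.countP (fun q => decide (q.1 = ℓ ∧ q.2 = "C")) : Int)
def cDI (qs : List (Int × String)) (ℓ : Int) : Int := (qs.countP (fun q => decide (q.1 = ℓ ∧ q.2 = "D")) : Int)

-- the canonical value both programs compute: one row per head level, counts taken over qs
def Fspec (heads : List Int) (qs : List (Int × String)) : List (List Int) :=
  heads.map (fun ℓ => [ℓ, cntI qs ℓ, cCI qs ℓ, cDI qs ℓ])

theorem keys_modify_self (d : PySem.Dict Int (Int × Int × Int)) (k : Int) (d0 : Int×Int×Int) (f : Int×Int×Int → Int×Int×Int)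
    (h : d.contains k = true) : (d.modify k d0 f).keys = d.keys := by
  rw [PySem.Dict.keys_modify, PySem.Dict.keys_insert_of_contains _ _ h]

theorem aStep_keys (d : PySem.Dict Int (Int × Int × Int)) (p : Int × String) :
    (aStep d p).keys = PySem.Set.add d.keys p.1 := by
  unfold aStep PySem.Set.add
  by_cases h : d.contains p.1
  · have h1 : (d.modify p.1 (0,0,0) (fun v => (v.1 + 1, v.2))).contains p.1 = true := by
      simp [PySem.Dict.contains_modify]
    have hm : PySem.Set.contains d.keys p.1 = true := by
      simpa [PySem.Set.contains, ← PySem.Dict.contains_iff_mem_keys] using h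
    simp only [h, if_true, hm]
    split_ifs <;>
      simp only [keys_modify_self _ _ _ _ h1, keys_modify_self _ _ _ _ h]
  · have hm : ¬ (p.1 ∈ d.keys) := by
      simpa [← PySem.Dict.contains_iff_mem_keys] using h
    have hk1 : (d.insert p.1 (0,0,0)).contains p.1 = true := PySem.Dict.contains_insert_self _ _ _
    have hk2 : ((d.insert p.1 (0,0,0)).modify p.1 (0,0,0) (fun v => (v.1 + 1, v.2))).contains p.1 = true := by
      simp [PySem.Dict.contains_modify]
    have hkeys : (d.insert p.1 ((0:Int),(0:Int),(0:Int))).keys = d.keys ++ [p.1] :=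
      PySem.Dict.keys_insert_of_not_contains _ _ (by simpa using h)
    have hc : d.keys.contains p.1 = false := by simpa using hm
    simp only [h, if_false, Bool.false_eq_true, PySem.Set.contains, hc]
    split_ifs <;>
      simp only [keys_modify_self _ _ _ _ hk2, keys_modify_self _ _ _ _ hk1, hkeys]

theorem aStep_getD (d : PySem.Dict Int (Int × Int × Int)) (p : Int × String) (ℓ : Int) :
    (aStep d p).getD ℓ (0, 0, 0) =
      if ℓ = p.1 then
        ((d.getD ℓ (0, 0, 0)).1 + 1,
         (d.getD ℓ (0, 0, 0)).2.1 + (if p.2 == "C" then 1 else 0),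
         (d.getD ℓ (0, 0, 0)).2.2 + (if p.2 == "D" then 1 else 0))
      else d.getD ℓ (0, 0, 0) := by
  unfold aStep
  have hins : ∀ (dd : PySem.Dict Int (Int × Int × Int)),
      (if dd.contains p.1 then dd else dd.insert p.1 (0,0,0)).getD ℓ (0,0,0) = dd.getD ℓ (0,0,0) := by
    intro dd
    split_ifs with h
    · rfl
    · rw [PySem.Dict.getD_insert]
      split_ifs with h2
      · subst h2; rw [PySem.Dict.getD_of_not_contains _ _ (by simpa using h)]
      · rfl
  by_cases hC : p.2 = "C" <;> by_cases hD : p.2 = "D" <;>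
    simp [hC, hD, PySem.Dict.getD_modify, hins] <;> split_ifs <;>
      simp_all [PySem.Dict.getD_of_not_contains]

theorem aLoop_keys (ps : List (Int × String)) (d : PySem.Dict Int (Int × Int × Int)) :
    (ps.foldl aStep d).keys = PySem.Set.update d.keys (ps.map Prod.fst) := by
  induction ps generalizing d with
  | nil => rfl
  | cons p rest ih =>
    simp only [List.foldl_cons, List.map_cons, PySem.Set.update, List.foldl_cons] at *
    rw [ih, aStep_keys]

theorem aLoop_getD (ps : List (Int × String)) (d : PySem.Dict Int (Int × Int × Int)) (ℓ : Int) :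
    (ps.foldl aStep d).getD ℓ (0, 0, 0) =
      ((d.getD ℓ (0, 0, 0)).1 + cntI ps ℓ,
       (d.getD ℓ (0, 0, 0)).2.1 + cCI ps ℓ,
       (d.getD ℓ (0, 0, 0)).2.2 + cDI ps ℓ) := by
  induction ps generalizing d with
  | nil => simp [cntI, cCI, cDI]
  | cons p rest ih =>
    simp only [List.foldl_cons]
    rw [ih, aStep_getD]
    by_cases h : ℓ = p.1 <;>
      by_cases hC : p.2 = "C" <;> by_cases hD : p.2 = "D" <;>
        simp [h, hC, hD, cntI, cCI, cDI, List.countP_cons] <;> push_cast <;> omega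

theorem foldl_add_cons_head {α : Type} [DecidableEq α] (ys : List α) (a : α) (s : List α)
    (h : ∀ y ∈ ys, y ≠ a) :
    ys.foldl PySem.Set.add (a :: s) = a :: ys.foldl PySem.Set.add s := by
  induction ys generalizing s with
  | nil => rfl
  | cons y ys ih =>
    have hya : y ≠ a := h y (by simp)
    simp only [List.foldl_cons]
    have hadd : PySem.Set.add (a :: s) y = a :: PySem.Set.add s y := by
      simp [PySem.Set.add, PySem.Set.contains, hya]
      split_ifs <;> simp_all
    rw [hadd, ih _ (fun y hy => h y (by simp [hy]))]

theorem foldl_add_filter_mem {α : Type} [DecidableEq α] (ys : List α) (s : List α) (x : α)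
    (h : x ∈ s) :
    ys.foldl PySem.Set.add s = (ys.filter (fun y => y ≠ x)).foldl PySem.Set.add s := by
  induction ys generalizing s with
  | nil => rfl
  | cons y ys ih =>
    by_cases hyx : y = x
    · subst hyx
      have : PySem.Set.add s y = s := by
        simp [PySem.Set.add, PySem.Set.contains, h]
      simp only [List.filter_cons, List.foldl_cons, this]
      simp only [ne_eq, not_true_eq_false, decide_false, Bool.false_eq_true, if_false]
      exact ih s h
    · simp only [List.filter_cons, List.foldl_cons, ne_eq, hyx, not_false_eq_true, decide_true, if_true]
      exact ih _ (by simp [PySem.Set.mem_add]; left; exact h)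

theorem ofList_cons_filter {α : Type} [DecidableEq α] (x : α) (xs : List α) :
    PySem.Set.ofList (x :: xs) = x :: PySem.Set.ofList (xs.filter (fun y => y ≠ x)) := by
  rw [PySem.Set.ofList_eq_foldl, PySem.Set.ofList_eq_foldl]
  simp only [List.foldl_cons]
  have h0 : PySem.Set.add ([] : List α) x = [x] := by simp [PySem.Set.add, PySem.Set.contains]
  rw [h0, foldl_add_filter_mem xs [x] x (by simp),
    foldl_add_cons_head _ x [] (by intro y hy; simp at hy; exact hy.2)]

theorem ofList_sublist {α : Type} [DecidableEq α] (xs : List α) :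
    (PySem.Set.ofList xs).Sublist xs := by
  induction hn : xs.length using Nat.strong_induction_on generalizing xs with
  | _ n ih =>
    match xs with
    | [] => simp [PySem.Set.ofList]
    | x :: xs =>
      rw [ofList_cons_filter]
      have hf : (xs.filter (fun y => y ≠ x)).length < n := by
        simp at hn
        have := List.length_filter_le (fun y => decide (y ≠ x)) xs
        omega
      exact List.Sublist.cons₂ x
        ((ih _ hf _ rfl).trans List.filter_sublist)

theorem Fspec_cons_irrel (heads : List Int) (q : Int × String) (rest : List (Int × String))
    (h : ∀ ℓ ∈ heads, ℓ ≠ q.1) : Fspec heads (q :: rest) = Fspec heads rest := by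
  unfold Fspec
  apply List.map_congr_left
  intro ℓ hℓ
  have := h ℓ hℓ
  simp [cntI, cCI, cDI, List.countP_cons, this, Ne.symm this]

theorem mem_ofList_filter_ne {x : Int} {xs : List Int} {a : Int}
    (hx : x ∈ PySem.Set.ofList (xs.filter (fun y => y ≠ a))) : x ≠ a := by
  rw [PySem.Set.mem_ofList] at hx
  simpa using (List.of_mem_filter hx)

theorem bLoop_spec (qs : List (Int × String)) (out : List (List Int)) (lvl t c d : Int)
    (hs : qs.Pairwise (fun a b => a.1 ≤ b.1)) (hge : ∀ q ∈ qs, lvl ≤ q.1) :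
    bLoop qs out lvl t c d =
      out ++ ([lvl, t + cntI qs lvl, c + cCI qs lvl, d + cDI qs lvl] ::
        Fspec (PySem.Set.ofList ((qs.map Prod.fst).filter (fun y => y ≠ lvl))) qs) := by
  induction qs generalizing out lvl t c d with
  | nil => simp [bLoop, cntI, cCI, cDI, Fspec, PySem.Set.ofList]
  | cons q rest ih =>
    obtain ⟨level, state⟩ := q
    rw [List.pairwise_cons] at hs
    by_cases h : level = lvl
    · subst h
      rw [bLoop.eq_def]
      simp only [if_pos rfl]
      rw [ih _ _ _ _ _ hs.2 (fun q hq => hs.1 q hq)]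
      have hfil : ((((level, state) :: rest).map Prod.fst).filter (fun y => y ≠ level))
          = ((rest.map Prod.fst).filter (fun y => y ≠ level)) := by
        simp
      rw [hfil, Fspec_cons_irrel _ (level, state) rest
        (fun ℓ hℓ => mem_ofList_filter_ne hℓ)]
      simp [cntI, cCI, cDI, List.countP_cons]
      refine ⟨by push_cast; ring, by push_cast; ring, by push_cast; ring⟩
    · have hlt : lvl < level := lt_of_le_of_ne (hge (level, state) (by simp)) (fun he => h he.symm)
      have hrest_gt : ∀ q ∈ rest, lvl < q.1 := fun q hq => lt_of_lt_of_le hlt (hs.1 q hq)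
      rw [bLoop.eq_def]
      simp only [if_neg h]
      rw [ih _ _ _ _ _ hs.2 (fun q hq => hs.1 q hq)]
      have hr0 : rest.countP (fun q => decide (q.1 = lvl)) = 0 :=
        List.countP_eq_zero.mpr (fun q hq => by simpa using (hrest_gt q hq).ne')
      have hrC0 : rest.countP (fun q => decide (q.1 = lvl ∧ q.2 = "C")) = 0 :=
        List.countP_eq_zero.mpr (fun q hq => by
          simp only [decide_eq_true_eq, not_and]
          intro he; exact absurd he (hrest_gt q hq).ne')
      have hrD0 : rest.countP (fun q => decide (q.1 = lvl ∧ q.2 = "D")) = 0 :=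
        List.countP_eq_zero.mpr (fun q hq => by
          simp only [decide_eq_true_eq, not_and]
          intro he; exact absurd he (hrest_gt q hq).ne')
      have hcnt0 : cntI ((level, state) :: rest) lvl = 0 := by
        simp only [cntI, List.countP_cons]; rw [hr0]; simp [h]
      have hcC0 : cCI ((level, state) :: rest) lvl = 0 := by
        simp only [cCI, List.countP_cons]; rw [hrC0]; simp [h]
      have hcD0 : cDI ((level, state) :: rest) lvl = 0 := by
        simp only [cDI, List.countP_cons]; rw [hrD0]; simp [h]
      have hfil : ((((level, state) :: rest).map Prod.fst).filter (fun y => y ≠ lvl))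
          = level :: rest.map Prod.fst := by
        simp only [List.map_cons, List.filter_cons]
        rw [if_pos (decide_eq_true (show level ≠ lvl from fun he => h he))]
        congr 1
        apply List.filter_eq_self.mpr
        intro y hy
        obtain ⟨q, hq, rfl⟩ := List.mem_map.mp hy
        exact decide_eq_true ((hrest_gt q hq).ne')
      rw [hfil, ofList_cons_filter]
      unfold Fspec
      simp only [List.map_cons]
      rw [hcnt0, hcC0, hcD0]
      have tail_eq : (PySem.Set.ofList ((rest.map Prod.fst).filter (fun y => y ≠ level))).map
            (fun ℓ => [ℓ, cntI ((level, state) :: rest) ℓ, cCI ((level, state) :: rest) ℓ, cDI ((level, state) :: rest) ℓ])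
          = Fspec (PySem.Set.ofList ((rest.map Prod.fst).filter (fun y => y ≠ level))) rest := by
        exact Fspec_cons_irrel _ (level, state) rest (fun ℓ hℓ => mem_ofList_filter_ne hℓ)
      rw [tail_eq]
      have hrow : ([level, cntI ((level, state) :: rest) level, cCI ((level, state) :: rest) level,
            cDI ((level, state) :: rest) level] : List Int)
          = [level, 1 + cntI rest level, (if state == "C" then 1 else 0) + cCI rest level,
             (if state == "D" then 1 else 0) + cDI rest level] := by
        by_cases hC : state = "C" <;> by_cases hD : state = "D" <;>
          simp [cntI, cCI, cDI, List.countP_cons, hC, hD] <;> push_cast <;> omega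
      rw [hrow]
      unfold Fspec
      simp

theorem A_eq_canon (pairs : List (Int × String)) :
    (let d := pairs.foldl aStep PySem.Dict.empty
     (PySem.List.sorted d.keys (fun x => x) false).map
       (fun level => let counts := d.getD level (0, 0, 0); [level, counts.1, counts.2.1, counts.2.2]))
    = Fspec (PySem.List.sorted (PySem.Set.ofList (pairs.map Prod.fst)) (fun x => x) false) pairs := by
  have hkeys : (pairs.foldl aStep PySem.Dict.empty).keys = PySem.Set.ofList (pairs.map Prod.fst) := by
    rw [aLoop_keys, PySem.Dict.keys_empty, PySem.Set.ofList_eq_foldl]; rfl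
  simp only [hkeys, Fspec]
  apply List.map_congr_left
  intro ℓ _
  rw [aLoop_getD, PySem.Dict.getD_empty]
  simp

theorem Fspec_perm (heads : List Int) (qs qs' : List (Int × String)) (h : qs.Perm qs') :
    Fspec heads qs = Fspec heads qs' := by
  unfold Fspec
  apply List.map_congr_left
  intro ℓ _
  simp [cntI, cCI, cDI, h.countP_eq]

theorem L_distribution_spec' (L_i : List Int) (S_i : List String) (n : Int)
    (hpre : Pre_L_distribution L_i S_i n) :
    L_distribution L_i S_i n = L_distribution_alt L_i S_i n := by
  unfold L_distribution L_distribution_alt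
  have hall : (L_i.zip S_i).all (fun p => p.2 == "C" || p.2 == "D") = true := by
    rw [List.all_eq_true]
    intro p hp
    rcases hpre p hp with h | h <;> simp [h]
  rw [if_pos hall]
  set pairs := L_i.zip S_i with hpairs
  rw [A_eq_canon pairs]
  rcases hsp : PySem.List.sorted pairs (fun p => p.1) false with _ | ⟨⟨lvl, s0⟩, rest⟩
  · have : pairs = [] := (PySem.List.sorted_eq_nil_iff pairs (fun p => p.1) false).mp hsp
    simp [this, Fspec, PySem.Set.ofList, PySem.List.sorted]
  · have hperm : ((lvl, s0) :: rest).Perm pairs := by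
      rw [← hsp]; exact PySem.List.sorted_perm pairs (fun p => p.1) false
    have hsorted : ((lvl, s0) :: rest).Pairwise (fun a b : Int × String => a.1 ≤ b.1) := by
      rw [← hsp]; exact PySem.List.sorted_pairwise pairs (fun p => p.1)
    rw [List.pairwise_cons] at hsorted
    -- B side via bLoop_spec
    dsimp only
    rw [bLoop_spec rest [] lvl 1 _ _ hsorted.2 (fun q hq => hsorted.1 q hq)]
    -- A side: rewrite the head list
    have hheads : PySem.List.sorted (PySem.Set.ofList (pairs.map Prod.fst)) (fun x => x) false
        = PySem.Set.ofList (((lvl, s0) :: rest).map Prod.fst) := by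
      apply PySem.List.sorted_eq_of_perm_of_pairwise_lt
      · rw [List.perm_ext_iff_of_nodup (PySem.Set.nodup_ofList _) (PySem.Set.nodup_ofList _)]
        intro x
        rw [PySem.Set.mem_ofList, PySem.Set.mem_ofList]
        exact (hperm.map Prod.fst).mem_iff
      · have hle : (((lvl, s0) :: rest).map Prod.fst).Pairwise (fun a b : Int => a ≤ b) :=
          List.Pairwise.map Prod.fst (fun a b h => h) (List.pairwise_cons.mpr hsorted)
        have hle' := List.Pairwise.sublist (ofList_sublist _) hle
        have hnd : (PySem.Set.ofList (((lvl, s0) :: rest).map Prod.fst)).Nodup :=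
          PySem.Set.nodup_ofList _
        exact (hle'.and hnd).imp (fun h => lt_of_le_of_ne h.1 h.2)
    rw [hheads]
    have hperm' : pairs.Perm ((lvl, s0) :: rest) := hperm.symm
    rw [Fspec_perm _ pairs ((lvl, s0) :: rest) hperm']
    -- both sides now over the sorted list; expand the head
    rw [List.map_cons, Prod.fst]
    rw [ofList_cons_filter]
    unfold Fspec
    simp only [List.map_cons, List.nil_append]
    congr 1
    · by_cases hC : s0 = "C" <;> by_cases hD : s0 = "D" <;>
        simp [cntI, cCI, cDI, List.countP_cons, hC, hD] <;> push_cast <;> omega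
    · exact Fspec_cons_irrel _ (lvl, s0) rest (fun ℓ hℓ => mem_ofList_filter_ne hℓ)

-- ===== VERDICT (by name: the statement is the Claim_ definition above) =====
theorem L_distribution_spec : Claim_equal_L_distribution := by
  intro L_i S_i n _ hpre
  exact L_distribution_spec' L_i S_i n hpre
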